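-- pv_equiv track=rewrite | github.com/AlleksRoy/coco-jamboo-hackaton-2025 | app.py | create_wardrobe_summary
-- ===== SOURCE A (Python) =====
-- def create_wardrobe_summary(wardrobe: list) -> str:
--     """
--     Creates a concise text summary of wardrobe instead of full JSON
--     to save tokens when wardrobe is very large.
--     """
--     if not wardrobe:
--         return "No wardrobe items"
--
--     # Group items by type
--     types = {}
--     for item in wardrobe:
--         item_type = item.get("type", "Other")
--         if item_type not in types:
--             types[item_type] = 0
--         types[item_type] += 1
--
--     # Create summary
--     summary = "Available wardrobe items:\n"
--     for item_type, count in sorted(types.items()):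
--         summary += f"- {item_type}: {count} items\n"
--
--     summary += f"\nTotal: {len(wardrobe)} items"
--     return summary
-- ===== SOURCE B (Python) =====
-- def create_wardrobe_summary(wardrobe: list) -> str:
--     """Sort the type keys once, then emit each run of equal types in a single
--     two-pointer pass over the sorted list (no counting dict)."""
--     if not wardrobe:
--         return "No wardrobe items"
--
--     keys = sorted(item.get("type", "Other") for item in wardrobe)
--
--     summary = "Available wardrobe items:\n"
--     while keys:
--         k = keys[0]
--         run = 1
--         while run < len(keys) and keys[run] == k:
--             run += 1
--         summary += f"- {k}: {run} items\n"
--         keys = keys[run:]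
--
--     summary += f"\nTotal: {len(wardrobe)} items"
--     return summary
-- ===== Notes on version B (the rewrite author's own statement) =====
-- stated objective: alternative
-- what changed: Replaces the dict-of-counts accumulation followed by sorting the (type,count) items with sorting the type keys once and emitting each consecutive run of equal types in a single two-pointer pass (no counting dict).
import Mathlib
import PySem

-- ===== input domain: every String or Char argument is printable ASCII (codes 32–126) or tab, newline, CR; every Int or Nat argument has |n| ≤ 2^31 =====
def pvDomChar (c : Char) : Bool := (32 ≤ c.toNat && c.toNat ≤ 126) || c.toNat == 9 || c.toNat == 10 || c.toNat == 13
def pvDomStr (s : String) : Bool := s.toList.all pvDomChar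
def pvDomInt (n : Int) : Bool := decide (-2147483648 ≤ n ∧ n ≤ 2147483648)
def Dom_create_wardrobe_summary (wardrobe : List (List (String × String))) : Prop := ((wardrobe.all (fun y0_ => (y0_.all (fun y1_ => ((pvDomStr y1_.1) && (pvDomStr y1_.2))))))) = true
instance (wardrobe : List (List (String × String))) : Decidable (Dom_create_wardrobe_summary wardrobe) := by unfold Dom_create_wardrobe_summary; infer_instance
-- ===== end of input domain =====

-- B replaces A's count-dict + item sort by sorting the type keys once and emitting
-- consecutive runs in a single pass (alternative decomposition, same cost).


-- item.get("type", "Other") : first-match lookup in the association list, with default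
def pvKeyOf (item : List (String × String)) : String :=
  (PySem.Dict.mk item).getD "type" "Other"

-- ===== PORT A =====
def create_wardrobe_summary (wardrobe : List (List (String × String))) : String :=
  if wardrobe = [] then "No wardrobe items" else
  -- types = {}; for item in wardrobe: count by item.get("type", "Other")
  let types := wardrobe.foldl (fun d item =>
      let item_type := pvKeyOf item
      let d := if d.contains item_type = false then d.insert item_type 0 else d
      d.insert item_type (d.getD item_type 0 + 1))
    (PySem.Dict.empty : PySem.Dict String Int)
  -- summary = header; for item_type, count in sorted(types.items()): append a line
  let summary := (PySem.List.sorted2 types.items (fun p => p.1) (fun p => p.2) false).foldl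
    (fun s p => s ++ "- " ++ p.1 ++ ": " ++ PySem.Int.toStr p.2 ++ " items\n")
    "Available wardrobe items:\n"
  summary ++ "\nTotal: " ++ PySem.Int.toStr (wardrobe.length : Int) ++ " items"

-- ===== PORT B =====
-- the inner while-loop of Source B: the run of keys equal to keys[0], then continue past it
def pvRuns : List String → List (String × Int)
  | [] => []
  | k :: rest =>
    (k, 1 + ((rest.takeWhile (fun x => x == k)).length : Int)) ::
      pvRuns (rest.dropWhile (fun x => x == k))
termination_by l => l.length
decreasing_by
  simp only [List.length_cons]
  exact Nat.lt_succ_of_le (List.length_dropWhile_le _ _)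

def create_wardrobe_summary_alt (wardrobe : List (List (String × String))) : String :=
  if wardrobe = [] then "No wardrobe items" else
  let keys := PySem.List.sorted (wardrobe.map pvKeyOf) (fun x => x) false
  let summary := (pvRuns keys).foldl
    (fun s p => s ++ "- " ++ p.1 ++ ": " ++ PySem.Int.toStr p.2 ++ " items\n")
    "Available wardrobe items:\n"
  summary ++ "\nTotal: " ++ PySem.Int.toStr (wardrobe.length : Int) ++ " items"

-- ===== PRECONDITION & SPEC =====
def Spec_create_wardrobe_summary (wardrobe : List (List (String × String))) (out : String) : Prop := out = create_wardrobe_summary_alt wardrobe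
instance (wardrobe : List (List (String × String))) (out : String) : Decidable (Spec_create_wardrobe_summary wardrobe out) := by unfold Spec_create_wardrobe_summary; infer_instance

-- ===== CLAIM (what is proved, stated in full; the proofs are below) =====
def Claim_equal_create_wardrobe_summary : Prop := ∀ (wardrobe : List (List (String × String))), Dom_create_wardrobe_summary wardrobe → Spec_create_wardrobe_summary wardrobe (create_wardrobe_summary wardrobe)

-- ===== LEMMAS AND PROOFS =====

-- A's counting loop is Counter of the key list
theorem pvFoldl_eq_counter (w : List (List (String × String))) :
    w.foldl (fun d item =>
        let item_type := pvKeyOf item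
        let d := if d.contains item_type = false then d.insert item_type 0 else d
        d.insert item_type (d.getD item_type 0 + 1))
      (PySem.Dict.empty : PySem.Dict String Int)
      = PySem.Dict.counter (w.map pvKeyOf) := by
  rw [← PySem.Dict.foldl_insert_getD_add_one_eq_counter, List.foldl_map]
  congr 1
  funext d item
  show (let item_type := pvKeyOf item
        let d := if d.contains item_type = false then d.insert item_type 0 else d
        d.insert item_type (d.getD item_type 0 + 1)) = _
  cases hc : d.contains (pvKeyOf item) with
  | false =>
    simp only [hc]
    rw [if_pos trivial, PySem.Dict.getD_insert_self, PySem.Dict.insert_insert_self,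
        PySem.Dict.getD_of_not_contains d 0 hc]
  | true =>
    simp only [hc]
    rw [if_neg (by decide)]

-- the two-key Python tuple sort is a one-key sort under the lexicographic order
theorem pvSorted2_eq_sorted_lex {α : Type} (xs : List α) (k1 : α → String) (k2 : α → Int) :
    PySem.List.sorted2 xs k1 k2 false
      = PySem.List.sorted xs (fun x => (toLex (k1 x, k2 x) : String ×ₗ Int)) false := by
  simp only [PySem.List.sorted2, PySem.List.sorted]
  congr 1
  funext acc x
  congr 1
  funext a b
  rcases lt_trichotomy (k1 a) (k1 b) with h | h | h
  · simp [h, Prod.Lex.lt_iff, not_lt_of_gt h]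
  · simp [h, Prod.Lex.lt_iff]
  · simp [h, not_lt_of_gt h, Prod.Lex.lt_iff, ne_of_gt h]

-- ofList keeps a sublist of the original (first occurrences, in order)
theorem pvOfList_sublist {α : Type} [BEq α] [LawfulBEq α] (xs : List α) :
    (PySem.Set.ofList xs).Sublist xs := by
  induction xs with
  | nil => simp [PySem.Set.ofList]
  | cons x xs ih =>
    rw [PySem.Set.ofList_cons]
    exact List.Sublist.cons₂ x ((List.filter_sublist).trans ih)

-- dropping one key's run from the distinct-element list
theorem pvOfList_run (k : String) (tw dw : List String) (htwk : ∀ x ∈ tw, x = k)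
    (hkdw : k ∉ dw) :
    (PySem.Set.ofList (tw ++ dw)).discard k = PySem.Set.ofList dw := by
  induction tw with
  | nil =>
    simp only [List.nil_append, PySem.Set.discard]
    refine List.filter_eq_self.mpr (fun y hy => ?_)
    have hydw : y ∈ dw := (PySem.Set.mem_ofList _ _).mp hy
    simp only [Bool.not_eq_eq_eq_not, Bool.not_true, beq_eq_false_iff_ne]
    exact fun hyk => hkdw (hyk ▸ hydw)
  | cons a tw' ihtw =>
    have ha : a = k := htwk a (by simp)
    have htwk' : ∀ x ∈ tw', x = k := fun x hx => htwk x (by simp [hx])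
    subst ha
    rw [List.cons_append, PySem.Set.ofList_cons]
    simp only [PySem.Set.discard, List.filter_cons]
    rw [if_neg (by simp), List.filter_filter]
    simp only [Bool.and_self]
    exact ihtw htwk'

-- run-length pass over a ≤-sorted list yields the (distinct key, total count) pairs
theorem pvRuns_of_pairwise_le (n : Nat) (l : List String) (hn : l.length ≤ n)
    (h : l.Pairwise (· ≤ ·)) :
    pvRuns l = (PySem.Set.ofList l).map (fun k => (k, (l.count k : Int))) := by
  induction n generalizing l with
  | zero =>
    have : l = [] := List.eq_nil_of_length_eq_zero (Nat.le_zero.mp hn)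
    subst this; rw [pvRuns]; simp [PySem.Set.ofList]
  | succ n ih =>
    cases l with
    | nil => rw [pvRuns]; simp [PySem.Set.ofList]
    | cons k rest =>
      have hle : ∀ x ∈ rest, k ≤ x := fun x hx => (List.pairwise_cons.mp h).1 x hx
      have hrest : rest.Pairwise (· ≤ ·) := (List.pairwise_cons.mp h).2
      have hsplit : rest.takeWhile (fun x => x == k) ++ rest.dropWhile (fun x => x == k) = rest :=
        List.takeWhile_append_dropWhile
      set tw := rest.takeWhile (fun x => x == k) with htw
      set dw := rest.dropWhile (fun x => x == k) with hdw
      have htwk : ∀ x ∈ tw, x = k := fun x hx => by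
        simpa using List.mem_takeWhile_imp hx
      have hkdw : k ∉ dw := by
        intro hk
        cases hdwe : dw with
        | nil => rw [hdwe] at hk; exact absurd hk (List.not_mem_nil)
        | cons y t =>
          have hy : (fun x => x == k) y = false := by
            have := List.head?_dropWhile_not (fun x => x == k) rest
            rw [← hdw, hdwe] at this; simpa using this
          have hyk : y ≠ k := by simpa using hy
          have hky : k ≤ y := hle y (by rw [← hsplit, hdwe]; simp)
          rw [hdwe] at hk
          rcases List.mem_cons.mp hk with rfl | hk
          · exact hyk rfl
          · have hdwsub : (y :: t).Sublist rest := by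
              rw [← hdwe, hdw]; exact List.dropWhile_sublist _
            have hpar : (y :: t).Pairwise (· ≤ ·) := hrest.sublist hdwsub
            have hyk' : y ≤ k := (List.pairwise_cons.mp hpar).1 k hk
            exact hyk (le_antisymm hyk' hky)
      have hdwpar : dw.Pairwise (· ≤ ·) := hrest.sublist (by rw [hdw]; exact List.dropWhile_sublist _)
      have hdwn : dw.length ≤ n := by
        have h1 : dw.length ≤ rest.length := by rw [hdw]; exact List.length_dropWhile_le _ _
        have h2 : rest.length + 1 ≤ n + 1 := by simpa using hn
        omega
      -- the head's total count is the run length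
      have hcnt_k : ((k :: rest).count k : Int) = 1 + (tw.length : Int) := by
        have h1 : rest.count k = tw.count k + dw.count k := by
          rw [← hsplit, List.count_append]
        have h2 : tw.count k = tw.length := List.count_eq_length.mpr (fun x hx => by
          simp [htwk x hx])
        have h3 : dw.count k = 0 := List.count_eq_zero.mpr hkdw
        rw [List.count_cons_self, h1, h2, h3]
        push_cast; ring
      -- the distinct keys are the head followed by the distinct keys past the run
      have hofl : PySem.Set.ofList (k :: rest) = k :: PySem.Set.ofList dw := by
        rw [PySem.Set.ofList_cons, ← hsplit, pvOfList_run k tw dw htwk hkdw]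
      rw [pvRuns, hofl, List.map_cons, ← htw, ← hdw, ← hcnt_k]
      congr 1
      rw [ih dw hdwn hdwpar]
      refine List.map_congr_left (fun k' hk' => ?_)
      have hk'dw : k' ∈ dw := (PySem.Set.mem_ofList _ _).mp hk'
      have hk'k : k' ≠ k := fun he => hkdw (he ▸ hk'dw)
      have htw0 : tw.count k' = 0 := List.count_eq_zero.mpr (fun hmem => hk'k (htwk k' hmem))
      rw [← hsplit, List.count_cons, List.count_append, htw0]
      simp [Ne.symm hk'k]

-- canonical form: A's sorted items list equals B's run list
theorem pvPairs_eq (w : List (List (String × String))) :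
    PySem.List.sorted2
        ((w.foldl (fun d item =>
            let item_type := pvKeyOf item
            let d := if d.contains item_type = false then d.insert item_type 0 else d
            d.insert item_type (d.getD item_type 0 + 1))
          (PySem.Dict.empty : PySem.Dict String Int)).items)
        (fun p => p.1) (fun p => p.2) false
      = pvRuns (PySem.List.sorted (w.map pvKeyOf) (fun x => x) false) := by
  set keys := w.map pvKeyOf with hkeys
  set S := PySem.Set.ofList keys with hS
  set sortedS := PySem.List.sorted S (fun x => x) false with hsortedS
  -- A side
  have hA : PySem.List.sorted2
        ((w.foldl (fun d item =>
            let item_type := pvKeyOf item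
            let d := if d.contains item_type = false then d.insert item_type 0 else d
            d.insert item_type (d.getD item_type 0 + 1))
          (PySem.Dict.empty : PySem.Dict String Int)).items)
        (fun p => p.1) (fun p => p.2) false
      = sortedS.map (fun k => (k, (keys.count k : Int))) := by
    rw [pvFoldl_eq_counter, PySem.Dict.items_counter, pvSorted2_eq_sorted_lex]
    apply PySem.List.sorted_eq_of_perm_of_pairwise_lt
    · exact (PySem.List.sorted_perm S (fun x => x) false).map _
    · have hlt : sortedS.Pairwise (· < ·) := PySem.List.sorted_ofList_pairwise_lt keys
      refine hlt.map _ (fun a b hab => ?_)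
      simp [Prod.Lex.lt_iff, hab]
  -- B side
  have hsorted_pair : (PySem.List.sorted keys (fun x => x) false).Pairwise (· ≤ ·) :=
    PySem.List.sorted_pairwise keys (fun x => x)
  have hperm : (PySem.List.sorted keys (fun x => x) false).Perm keys :=
    PySem.List.sorted_perm keys (fun x => x) false
  have hB : pvRuns (PySem.List.sorted keys (fun x => x) false)
      = sortedS.map (fun k => (k, (keys.count k : Int))) := by
    rw [pvRuns_of_pairwise_le (PySem.List.sorted keys (fun x => x) false).length _ le_rfl
        hsorted_pair]
    have hofl : PySem.Set.ofList (PySem.List.sorted keys (fun x => x) false) = sortedS := by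
      symm
      apply PySem.List.sorted_eq_of_perm_of_pairwise_lt
      · exact (List.perm_ext_iff_of_nodup (PySem.Set.nodup_ofList _)
          (PySem.Set.nodup_ofList _)).mpr (fun a => by
            rw [PySem.Set.mem_ofList, PySem.Set.mem_ofList, hperm.mem_iff])
      · have hsub := pvOfList_sublist (PySem.List.sorted keys (fun x => x) false)
        have hle := hsorted_pair.sublist hsub
        have hnd : (PySem.Set.ofList (PySem.List.sorted keys (fun x => x) false)).Nodup :=
          PySem.Set.nodup_ofList _
        exact (hle.and hnd).imp (fun h => lt_of_le_of_ne h.1 h.2)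
    rw [hofl]
    refine List.map_congr_left (fun k _ => ?_)
    rw [hperm.count_eq]
  rw [hA, hB]

-- ===== VERDICT (by name: the statement is the Claim_ definition above) =====
theorem create_wardrobe_summary_spec : Claim_equal_create_wardrobe_summary := by
  intro wardrobe _
  show create_wardrobe_summary wardrobe = create_wardrobe_summary_alt wardrobe
  by_cases hw : wardrobe = []
  · simp [create_wardrobe_summary, create_wardrobe_summary_alt, hw]
  · simp only [create_wardrobe_summary, create_wardrobe_summary_alt, if_neg hw]
    rw [pvPairs_eq wardrobe]
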